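-- pv_equiv track=rewrite | github.com/xcczach/mer-testbench | test_bench.py | my_get_prediction_and_true_ids
-- ===== SOURCE A (Python) =====
-- def my_get_prediction_and_true_ids(
--     emotion_groups: list[list], prediction_emotions: list[str], true_emotions: list[str]
-- ) -> tuple[set[int], set[int]]:
--     prediction_ids = set()
--     true_ids = set()
--     for emotion in prediction_emotions:
--         for i, arr in enumerate(emotion_groups):
--             if emotion in arr:
--                 prediction_ids.add(i)
--     for emotion in true_emotions:
--         for i, arr in enumerate(emotion_groups):
--             if emotion in arr:
--                 true_ids.add(i)
--     return prediction_ids, true_ids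
-- ===== SOURCE B (Python) =====
-- def my_get_prediction_and_true_ids(
--     emotion_groups: list[list], prediction_emotions: list[str], true_emotions: list[str]
-- ) -> tuple[set[int], set[int]]:
--     # Inverted index: emotion -> ascending list of indices of groups containing it.
--     pairs = [(m, i) for i, arr in enumerate(emotion_groups) for m in dict.fromkeys(arr)]
--     index = {}
--     for m, i in pairs:
--         index[m] = index.get(m, []) + [i]
--     prediction_ids = set()
--     for e in prediction_emotions:
--         prediction_ids.update(index.get(e, []))
--     true_ids = set()
--     for e in true_emotions:
--         true_ids.update(index.get(e, []))
--     return prediction_ids, true_ids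
-- ===== Notes on version B (the rewrite author's own statement) =====
-- stated objective: faster
-- what changed: Replaces A's per-emotion scan of all groups with an inverted index (emotion -> list of group indices) built in one pass over the groups, so each query emotion is answered by a single dict lookup.
import Mathlib
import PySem

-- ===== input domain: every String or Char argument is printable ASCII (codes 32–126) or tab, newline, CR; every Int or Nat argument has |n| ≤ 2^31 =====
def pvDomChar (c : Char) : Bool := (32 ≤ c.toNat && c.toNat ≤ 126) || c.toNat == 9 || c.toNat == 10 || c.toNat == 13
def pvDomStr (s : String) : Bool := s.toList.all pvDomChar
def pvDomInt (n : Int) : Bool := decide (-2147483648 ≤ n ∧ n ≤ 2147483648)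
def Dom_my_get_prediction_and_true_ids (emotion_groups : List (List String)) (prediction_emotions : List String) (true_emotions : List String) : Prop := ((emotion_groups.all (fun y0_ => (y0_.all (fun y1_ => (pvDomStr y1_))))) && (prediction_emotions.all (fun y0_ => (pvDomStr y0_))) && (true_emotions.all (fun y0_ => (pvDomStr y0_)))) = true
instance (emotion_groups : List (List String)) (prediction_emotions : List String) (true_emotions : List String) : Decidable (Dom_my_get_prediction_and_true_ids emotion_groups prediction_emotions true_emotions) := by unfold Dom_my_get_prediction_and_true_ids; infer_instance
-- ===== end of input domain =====

-- ===== PORT A =====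
-- A: for each query emotion, scan all groups and add the index of every group containing it.
def my_get_prediction_and_true_ids (emotion_groups : List (List String)) (prediction_emotions : List String) (true_emotions : List String) : List Int × List Int :=
  let prediction_ids : PySem.Set Int :=
    prediction_emotions.foldl (fun s emotion =>
      (PySem.List.enumerate emotion_groups).foldl (fun s q =>
        if emotion ∈ q.2 then PySem.Set.add s q.1 else s) s) PySem.Set.empty
  let true_ids : PySem.Set Int :=
    true_emotions.foldl (fun s emotion =>
      (PySem.List.enumerate emotion_groups).foldl (fun s q =>
        if emotion ∈ q.2 then PySem.Set.add s q.1 else s) s) PySem.Set.empty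
  (prediction_ids, true_ids)

-- ===== PORT B =====
-- B: build an inverted index emotion -> list of group indices once, then answer queries by lookup.
def my_get_prediction_and_true_ids_alt (emotion_groups : List (List String)) (prediction_emotions : List String) (true_emotions : List String) : List Int × List Int :=
  let pairs : List (String × Int) :=
    (PySem.List.enumerate emotion_groups).flatMap (fun q =>
      (PySem.List.dedup q.2).map (fun m => (m, q.1)))
  let index : PySem.Dict String (List Int) :=
    pairs.foldl (fun d pr => d.modify pr.1 [] (· ++ [pr.2])) PySem.Dict.empty
  let prediction_ids : PySem.Set Int :=
    prediction_emotions.foldl (fun s e => PySem.Set.update s (index.getD e [])) PySem.Set.empty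
  let true_ids : PySem.Set Int :=
    true_emotions.foldl (fun s e => PySem.Set.update s (index.getD e [])) PySem.Set.empty
  (prediction_ids, true_ids)


-- ===== PRECONDITION & SPEC =====
def Spec_my_get_prediction_and_true_ids (emotion_groups : List (List String)) (prediction_emotions : List String) (true_emotions : List String) (out : List Int × List Int) : Prop := out = my_get_prediction_and_true_ids_alt emotion_groups prediction_emotions true_emotions
instance (emotion_groups : List (List String)) (prediction_emotions : List String) (true_emotions : List String) (out : List Int × List Int) : Decidable (Spec_my_get_prediction_and_true_ids emotion_groups prediction_emotions true_emotions out) := by unfold Spec_my_get_prediction_and_true_ids; infer_instance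

-- ===== CLAIM (what is proved, stated in full; the proofs are below) =====
def Claim_equal_my_get_prediction_and_true_ids : Prop := ∀ (emotion_groups : List (List String)) (prediction_emotions : List String) (true_emotions : List String), Dom_my_get_prediction_and_true_ids emotion_groups prediction_emotions true_emotions → Spec_my_get_prediction_and_true_ids emotion_groups prediction_emotions true_emotions (my_get_prediction_and_true_ids emotion_groups prediction_emotions true_emotions)

-- ===== LEMMAS AND PROOFS =====

-- On a duplicate-free list, filtering by equality with e yields [e] iff e is a member.
theorem pv_filter_beq_of_nodup (l : List String) (e : String) (h : l.Nodup) :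
    l.filter (fun m => m == e) = if e ∈ l then [e] else [] := by
  induction l with
  | nil => simp
  | cons a l ih =>
    simp only [List.nodup_cons] at h
    by_cases hae : a = e
    · subst hae
      simp [ih h.2, h.1]
    · simp [hae, ih h.2, Ne.symm hae]

-- The pairs contributed by one group, restricted to emotion e.
theorem pv_group_pairs (a : List String) (i : Int) (e : String) :
    (((PySem.List.dedup a).map (fun m => (m, i))).filter (fun pr => pr.1 == e)).map (·.2)
      = if e ∈ a then [i] else [] := by
  rw [List.filter_map]
  have : ((fun pr : String × Int => pr.1 == e) ∘ (fun m => (m, i))) = (fun m => m == e) := rfl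
  rw [this, pv_filter_beq_of_nodup _ _ (PySem.List.nodup_dedup a)]
  by_cases h : e ∈ a <;> simp [h]

-- Looking up e in the flattened pair list = the matching group indices, in order.
theorem pv_pairs_lookup (l : List (Int × List String)) (e : String) :
    ((l.flatMap (fun q => (PySem.List.dedup q.2).map (fun m => (m, q.1)))).filter
        (fun pr => pr.1 == e)).map (·.2)
      = l.flatMap (fun q => if e ∈ q.2 then [q.1] else []) := by
  induction l with
  | nil => simp
  | cons q l ih =>
    simp only [List.flatMap_cons, List.filter_append, List.map_append, ih, pv_group_pairs]

-- A's conditional-add scan is the fold of Set.add over the matching indices.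
theorem pv_foldl_if_add (e : String) (l : List (Int × List String)) (s : PySem.Set Int) :
    l.foldl (fun s q => if e ∈ q.2 then PySem.Set.add s q.1 else s) s
      = (l.flatMap (fun q => if e ∈ q.2 then [q.1] else [])).foldl PySem.Set.add s := by
  induction l generalizing s with
  | nil => rfl
  | cons q l ih => by_cases h : e ∈ q.2 <;> simp [h, ih]

-- Pointwise: A's inner scan over the groups = B's lookup in the inverted index.
theorem pv_inner (g : List (List String)) (e : String) (s : PySem.Set Int) :
    (PySem.List.enumerate g).foldl (fun s q => if e ∈ q.2 then PySem.Set.add s q.1 else s) s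
      = PySem.Set.update s
          ((((PySem.List.enumerate g).flatMap (fun q =>
              (PySem.List.dedup q.2).map (fun m => (m, q.1)))).foldl
            (fun d pr => d.modify pr.1 [] (· ++ [pr.2])) PySem.Dict.empty).getD e []) := by
  rw [pv_foldl_if_add, PySem.Dict.getD_foldl_modify_append, PySem.Dict.getD_empty,
    List.nil_append, pv_pairs_lookup]
  rfl


-- ===== VERDICT (by name: the statement is the Claim_ definition above) =====
theorem my_get_prediction_and_true_ids_spec : Claim_equal_my_get_prediction_and_true_ids := by
  intro emotion_groups prediction_emotions true_emotions _
  unfold Spec_my_get_prediction_and_true_ids my_get_prediction_and_true_ids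
    my_get_prediction_and_true_ids_alt
  simp only [pv_inner]
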